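-- pv_equiv track=rewrite | github.com/thealper2/leetcode-solutions | 3700-3799/3737-Count-Subarrays-With-Majority-Element-1.py | countMajoritySubarrays
-- ===== SOURCE A (Python) =====
-- from typing import List
--
-- def countMajoritySubarrays(nums: List[int], target: int) -> int:
--     n = len(nums)
--     total = 0
--     for i in range(n):
--         count = 0
--         for j in range(i, n):
--             if nums[j] == target:
--                 count += 1
--
--             if count > (j - i + 1) // 2:
--                 total += 1
--
--     return total
-- ===== SOURCE B (Python) =====
-- def countMajoritySubarrays(nums, target):
--     # O(n): map to +/-1 prefix sums; for each prefix value p, count earlier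
--     # prefixes strictly below p, maintained incrementally since p moves by +/-1.
--     cnt = {0: 1}
--     p = 0
--     less = 0
--     total = 0
--     for x in nums:
--         if x == target:
--             less += cnt.get(p, 0)
--             p += 1
--         else:
--             p -= 1
--             less -= cnt.get(p, 0)
--         total += less
--         cnt[p] = cnt.get(p, 0) + 1
--     return total
-- ===== Notes on version B (the rewrite author's own statement) =====
-- stated objective: faster
-- what changed: Replaced A's O(n^2) double loop (recounting the majority condition for every start index) by a single O(n) pass: elements map to +/-1 prefix sums and a hash counter of previously seen prefix values maintains, incrementally as the prefix sum moves by +/-1, the number of earlier prefixes strictly below the current one.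
import Mathlib
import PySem

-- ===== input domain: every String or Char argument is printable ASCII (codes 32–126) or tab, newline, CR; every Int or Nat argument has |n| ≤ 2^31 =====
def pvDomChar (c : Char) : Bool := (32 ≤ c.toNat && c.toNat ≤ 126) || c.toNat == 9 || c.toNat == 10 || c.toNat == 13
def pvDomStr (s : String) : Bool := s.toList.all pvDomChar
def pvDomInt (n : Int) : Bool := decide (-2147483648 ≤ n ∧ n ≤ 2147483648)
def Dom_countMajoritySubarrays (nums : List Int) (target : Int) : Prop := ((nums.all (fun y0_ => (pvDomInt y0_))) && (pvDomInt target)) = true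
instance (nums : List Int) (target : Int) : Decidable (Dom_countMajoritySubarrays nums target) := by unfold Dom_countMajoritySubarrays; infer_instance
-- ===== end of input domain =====

-- B replaces A's O(n^2) double loop by a single O(n) pass over ±1 prefix sums with a
-- counter of previously seen prefix values (objective: faster, asymptotic).

-- ===== PORT A =====
def countMajoritySubarrays (nums : List Int) (target : Int) : Int :=
  let n : Int := nums.length
  (PySem.List.pyRange 0 n 1).foldl
    (fun (total : Int) (i : Int) =>
      ((PySem.List.pyRange i n 1).foldl
        (fun (st : Int × Int) (j : Int) =>
          let count := if PySem.List.pyGetD nums j 0 = target then st.1 + 1 else st.1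
          let total := if count > PySem.Int.floordiv (j - i + 1) 2 then st.2 + 1 else st.2
          (count, total))
        (0, total)).2)
    0

-- ===== PORT B =====
def countMajoritySubarrays_alt (nums : List Int) (target : Int) : Int :=
  let st := nums.foldl
    (fun (st : PySem.Dict Int Int × Int × Int × Int) (x : Int) =>
      let cnt := st.1
      let pl : Int × Int :=
        if x = target then (st.2.1 + 1, st.2.2.1 + cnt.getD st.2.1 0)
        else (st.2.1 - 1, st.2.2.1 - cnt.getD (st.2.1 - 1) 0)
      let total := st.2.2.2 + pl.2
      (cnt.insert pl.1 (cnt.getD pl.1 0 + 1), pl.1, pl.2, total))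
    (PySem.Dict.ofList [((0 : Int), (1 : Int))], 0, 0, 0)
  st.2.2.2

-- ===== PRECONDITION & SPEC =====
def Spec_countMajoritySubarrays (nums : List Int) (target : Int) (out : Int) : Prop := out = countMajoritySubarrays_alt nums target
instance (nums : List Int) (target : Int) (out : Int) : Decidable (Spec_countMajoritySubarrays nums target out) := by unfold Spec_countMajoritySubarrays; infer_instance

-- ===== CLAIM (what is proved, stated in full; the proofs are below) =====
def Claim_equal_countMajoritySubarrays : Prop := ∀ (nums : List Int) (target : Int), Dom_countMajoritySubarrays nums target → Spec_countMajoritySubarrays nums target (countMajoritySubarrays nums target)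

-- ===== LEMMAS AND PROOFS =====

/-- Sign of one element: +1 if it equals the target, -1 otherwise. -/
def pvSgn (t x : Int) : Int := if x = t then 1 else -1

/-- Running ±1 sums of a list, starting from `d` (the start value itself excluded). -/
def pvDiffs (t : Int) : List Int → Int → List Int
  | [], _ => []
  | x :: xs, d => (d + pvSgn t x) :: pvDiffs t xs (d + pvSgn t x)

/-- Number of strictly positive entries, as an Int. -/
def pvPos (l : List Int) : Int := (l.countP (fun y => decide (0 < y)) : Int)

/-- Number of pairs (earlier, later) with earlier < later. -/
def pvPair : List Int → Int
  | [] => 0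
  | x :: xs => (xs.countP (fun y => decide (x < y)) : Int) + pvPair xs

/-- The common specification: sum over all suffixes of the number of positive running sums. -/
def pvSpec (t : Int) : List Int → Int
  | [] => 0
  | x :: xs => pvPos (pvDiffs t (x :: xs) 0) + pvSpec t xs

theorem pvDiffs_shift (t : Int) (l : List Int) : ∀ d c : Int,
    pvDiffs t l (d + c) = (pvDiffs t l d).map (· + c) := by
  induction l with
  | nil => intro d c; rfl
  | cons x xs ih =>
      intro d c
      simp [pvDiffs]
      constructor
      · omega
      · have := ih (d + pvSgn t x) c
        rw [← this]
        congr 1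
        omega

theorem pvPair_append_singleton (v : Int) : ∀ l : List Int,
    pvPair (l ++ [v]) = pvPair l + (l.countP (fun y => decide (y < v)) : Int) := by
  intro l
  induction l with
  | nil => simp [pvPair]
  | cons x xs ih =>
      simp [pvPair, List.countP_append, List.countP_cons, ih]
      split_ifs <;> omega

theorem pvPair_walk (t : Int) : ∀ (l : List Int) (p : Int),
    pvPair (p :: pvDiffs t l p) = pvSpec t l := by
  intro l
  induction l with
  | nil => intro p; simp [pvPair, pvDiffs, pvSpec]
  | cons x xs ih =>
      intro p
      have hshift : pvDiffs t xs (pvSgn t x + p) = (pvDiffs t xs (pvSgn t x)).map (· + p) :=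
        pvDiffs_shift t xs (pvSgn t x) p
      have hcount : ((pvDiffs t xs (pvSgn t x)).map (· + p)).countP (fun y => decide (p < y))
          = (pvDiffs t xs (pvSgn t x)).countP (fun y => decide (0 < y)) := by
        rw [List.countP_map]
        apply List.countP_congr
        intro y _
        simp only [Function.comp]
        by_cases h : 0 < y <;> simp [h]
      have ihx := ih (p + pvSgn t x)
      simp only [pvDiffs, pvPair, pvSpec, pvPos, List.countP_cons] at *
      have hpp : p + pvSgn t x = pvSgn t x + p := by ring
      rw [hpp] at ihx ⊢
      rw [hshift] at ihx ⊢
      rw [← ihx, hcount]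
      have hsgn : (decide (p < pvSgn t x + p) : Bool) = (decide ((0:Int) < pvSgn t x)) := by
        by_cases h : (0:Int) < pvSgn t x <;> simp [h]
      rw [hsgn]
      push_cast
      ring_nf

theorem pvCountP_lt_succ (p : Int) : ∀ l : List Int,
    l.countP (fun y => decide (y ≤ p)) = l.countP (fun y => decide (y < p)) + l.count p := by
  intro l
  induction l with
  | nil => simp
  | cons x xs ih =>
      rw [List.countP_cons, List.countP_cons, List.count_cons, ih]
      by_cases h : x = p
      · simp [h]; omega
      · have h1 : (decide (x ≤ p) : Bool) = decide (x < p) := by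
          by_cases h2 : x < p <;> simp [h2] <;> omega
        simp [h, h1]; split_ifs <;> omega

theorem pvPos_cons (y : Int) (l : List Int) :
    pvPos (y :: l) = (if 0 < y then 1 else 0) + pvPos l := by
  simp [pvPos, List.countP_cons]
  split_ifs <;> omega

-- A's inner loop over j ∈ [a, n) starting from (count, total).
theorem pvInnerA (nums : List Int) (t i : Int) :
    ∀ (k a : Nat), a + k = nums.length → ∀ (count total : Int),
    ((PySem.List.pyRange (a : Int) (nums.length : Int) 1).foldl
        (fun (st : Int × Int) (j : Int) =>
          let count := if PySem.List.pyGetD nums j 0 = t then st.1 + 1 else st.1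
          let total := if count > PySem.Int.floordiv (j - i + 1) 2 then st.2 + 1 else st.2
          (count, total))
        (count, total)).2
      = total + pvPos (pvDiffs t (nums.drop a) (2 * count - ((a : Int) - i))) := by
  intro k
  induction k with
  | zero =>
      intro a hk count total
      have ha : a = nums.length := by omega
      subst ha
      rw [PySem.List.pyRange_one_eq_nil (le_refl _)]
      simp [pvDiffs, pvPos]
  | succ k ihk =>
      intro a hk count total
      have ha : a < nums.length := by omega
      have haI : (a : Int) < (nums.length : Int) := by exact_mod_cast ha
      rw [PySem.List.pyRange_one_cons haI, List.foldl_cons]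
      have hget : PySem.List.pyGetD nums ((a : Nat) : Int) 0 = nums[a] := by
        rw [PySem.List.pyGetD_natCast]
        simp [List.getD_eq_getElem?_getD, List.getElem?_eq_getElem ha]
      dsimp only
      rw [hget]
      have hcast : (a : Int) + 1 = ((a + 1 : Nat) : Int) := by push_cast; ring
      rw [hcast, ihk (a + 1) (by omega)]
      rw [List.drop_eq_getElem_cons ha]
      by_cases hx : nums[a] = t
      · simp only [hx, if_true, pvDiffs, gt_iff_lt,
          PySem.Int.floordiv_lt_iff_lt_mul (show (0:Int) < 2 by norm_num)]
        have hs : pvSgn t t = 1 := by simp [pvSgn]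
        simp only [hs]
        have hd : 2 * (count + 1) - (((a + 1 : Nat) : Int) - i)
            = 2 * count - ((a : Int) - i) + 1 := by push_cast; ring
        rw [hd, pvPos_cons]
        split_ifs <;> omega
      · simp only [hx, if_false, pvDiffs, gt_iff_lt,
          PySem.Int.floordiv_lt_iff_lt_mul (show (0:Int) < 2 by norm_num)]
        have hs : pvSgn t nums[a] = -1 := by simp [pvSgn, hx]
        simp only [hs]
        have hd : 2 * count - (((a + 1 : Nat) : Int) - i)
            = 2 * count - ((a : Int) - i) + -1 := by push_cast; ring
        rw [hd, pvPos_cons]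
        split_ifs <;> omega

-- A's outer loop.
theorem pvOuterA (nums : List Int) (t : Int) :
    ∀ (k a : Nat), a + k = nums.length → ∀ (total : Int),
    ((PySem.List.pyRange (a : Int) (nums.length : Int) 1).foldl
        (fun (total : Int) (i : Int) =>
          ((PySem.List.pyRange i (nums.length : Int) 1).foldl
            (fun (st : Int × Int) (j : Int) =>
              let count := if PySem.List.pyGetD nums j 0 = t then st.1 + 1 else st.1
              let total := if count > PySem.Int.floordiv (j - i + 1) 2 then st.2 + 1 else st.2
              (count, total))
            (0, total)).2)
        total)
      = total + pvSpec t (nums.drop a) := by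
  intro k
  induction k with
  | zero =>
      intro a hk total
      have ha : a = nums.length := by omega
      subst ha
      rw [PySem.List.pyRange_one_eq_nil (le_refl _)]
      simp [pvSpec]
  | succ k ihk =>
      intro a hk total
      have ha : a < nums.length := by omega
      have haI : (a : Int) < (nums.length : Int) := by exact_mod_cast ha
      rw [PySem.List.pyRange_one_cons haI, List.foldl_cons]
      dsimp only
      rw [pvInnerA nums t ((a : Nat) : Int) (k + 1) a (by omega) 0 total]
      have hz : 2 * (0 : Int) - (((a : Nat) : Int) - ((a : Nat) : Int)) = 0 := by ring
      rw [hz]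
      have hcast : ((a : Nat) : Int) + 1 = ((a + 1 : Nat) : Int) := by push_cast; ring
      rw [hcast, ihk (a + 1) (by omega)]
      rw [List.drop_eq_getElem_cons ha]
      simp only [pvSpec]
      ring

theorem pvCountP_lt_add_one (p : Int) (l : List Int) :
    l.countP (fun y => decide (y < p + 1)) = l.countP (fun y => decide (y < p)) + l.count p := by
  rw [← pvCountP_lt_succ]
  apply List.countP_congr
  intro y _
  by_cases h : y ≤ p <;> simp [h]

theorem pvCnt_insert (cnt : PySem.Dict Int Int) (L : List Int) (q : Int)
    (hcnt : ∀ v, cnt.getD v 0 = ((L.count v : Nat) : Int)) :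
    ∀ v, (cnt.insert q (cnt.getD q 0 + 1)).getD v 0 = (((L ++ [q]).count v : Nat) : Int) := by
  intro v
  rw [PySem.Dict.getD_insert]
  by_cases h : v = q
  · subst h
    simp [hcnt, List.count_append]
  · simp [h, hcnt, List.count_append, List.count_singleton]
    omega

-- B's loop invariant: state corresponds to the walk `rest ++ [p]` seen so far.
theorem pvLoopB (t : Int) : ∀ (l rest : List Int) (p : Int) (cnt : PySem.Dict Int Int) (less total : Int),
    (∀ v, cnt.getD v 0 = (((rest ++ [p]).count v : Nat) : Int)) →
    less = (rest.countP (fun y => decide (y < p)) : Int) →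
    total = pvPair (rest ++ [p]) →
    (l.foldl
      (fun (st : PySem.Dict Int Int × Int × Int × Int) (x : Int) =>
        let cnt := st.1
        let pl : Int × Int :=
          if x = t then (st.2.1 + 1, st.2.2.1 + cnt.getD st.2.1 0)
          else (st.2.1 - 1, st.2.2.1 - cnt.getD (st.2.1 - 1) 0)
        let total := st.2.2.2 + pl.2
        (cnt.insert pl.1 (cnt.getD pl.1 0 + 1), pl.1, pl.2, total))
      (cnt, p, less, total)).2.2.2
      = pvPair ((rest ++ [p]) ++ pvDiffs t l p) := by
  intro l
  induction l with
  | nil =>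
      intro rest p cnt less total hcnt hless htotal
      simpa [pvDiffs] using htotal
  | cons x xs ih =>
      intro rest p cnt less total hcnt hless htotal
      rw [List.foldl_cons]
      dsimp only
      by_cases hx : x = t
      · rw [if_pos hx]
        dsimp only
        have hsg : pvSgn t x = 1 := by simp [pvSgn, hx]
        have hcnt' := pvCnt_insert cnt (rest ++ [p]) (p + 1) hcnt
        have hless' : less + cnt.getD p 0
            = (((rest ++ [p]).countP (fun y => decide (y < p + 1)) : Nat) : Int) := by
          have h1 := pvCountP_lt_add_one p (rest ++ [p])
          have h2 := hcnt p
          have h3 : (rest ++ [p]).count p = rest.count p + 1 := by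
            simp [List.count_append]
          have h4 : (rest ++ [p]).countP (fun y => decide (y < p + 1))
              = rest.countP (fun y => decide (y < p + 1)) + 1 := by
            simp [List.countP_append]
          have h5 := pvCountP_lt_add_one p rest
          rw [h2, hless]
          omega
        have htotal' : total + (less + cnt.getD p 0) = pvPair ((rest ++ [p]) ++ [p + 1]) := by
          rw [pvPair_append_singleton, ← htotal, hless']
        have := ih (rest ++ [p]) (p + 1)
          (cnt.insert (p + 1) (cnt.getD (p + 1) 0 + 1))
          (less + cnt.getD p 0) (total + (less + cnt.getD p 0))
          hcnt' hless' htotal'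
        rw [this]
        simp only [pvDiffs, hsg]
        simp [List.append_assoc]
      · rw [if_neg hx]
        dsimp only
        have hsg : pvSgn t x = -1 := by simp [pvSgn, hx]
        have hcnt' := pvCnt_insert cnt (rest ++ [p]) (p - 1) hcnt
        have hless' : less - cnt.getD (p - 1) 0
            = (((rest ++ [p]).countP (fun y => decide (y < p - 1)) : Nat) : Int) := by
          have h2 := hcnt (p - 1)
          have h3 : (rest ++ [p]).count (p - 1) = rest.count (p - 1) := by
            simp [List.count_append, List.count_singleton]
            omega
          have h4 : (rest ++ [p]).countP (fun y => decide (y < p - 1))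
              = rest.countP (fun y => decide (y < p - 1)) := by
            simp [List.countP_append]
          have h5 := pvCountP_lt_add_one (p - 1) rest
          have h6 : p - 1 + 1 = p := by ring
          rw [h6] at h5
          rw [h2, hless]
          omega
        have htotal' : total + (less - cnt.getD (p - 1) 0) = pvPair ((rest ++ [p]) ++ [p - 1]) := by
          rw [pvPair_append_singleton, ← htotal, hless']
        have := ih (rest ++ [p]) (p - 1)
          (cnt.insert (p - 1) (cnt.getD (p - 1) 0 + 1))
          (less - cnt.getD (p - 1) 0) (total + (less - cnt.getD (p - 1) 0))
          hcnt' hless' htotal'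
        rw [this]
        simp only [pvDiffs, hsg]
        have h7 : p + -1 = p - 1 := by ring
        rw [h7]
        simp [List.append_assoc]

-- ===== VERDICT (by name: the statement is the Claim_ definition above) =====
theorem countMajoritySubarrays_spec : Claim_equal_countMajoritySubarrays := by
  intro nums target _
  unfold Spec_countMajoritySubarrays
  have eA : countMajoritySubarrays nums target = pvSpec target nums := by
    unfold countMajoritySubarrays
    dsimp only
    have e := pvOuterA nums target nums.length 0 (by omega) 0
    rw [Nat.cast_zero, List.drop_zero] at e
    rw [e]
    ring
  have eB : countMajoritySubarrays_alt nums target = pvSpec target nums := by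
    unfold countMajoritySubarrays_alt
    dsimp only
    have hcnt : ∀ v, (PySem.Dict.ofList [((0 : Int), (1 : Int))]).getD v 0
        = ((([(0 : Int)].count v : Nat) : Int)) := by
      intro v
      by_cases h : v = 0 <;>
        simp [h, PySem.Dict.getD_eq_get?_getD, PySem.Dict.ofList, PySem.Dict.update,
          PySem.Dict.get?_insert, PySem.Dict.get?_empty, List.count_singleton]
      omega
    have e := pvLoopB target nums [] 0 (PySem.Dict.ofList [((0 : Int), (1 : Int))]) 0 0
      (by simpa using hcnt) (by simp) (by simp [pvPair])
    rw [e]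
    rw [List.nil_append, ← pvPair_walk target nums 0]
    rfl
  rw [eA, eB]
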